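-- pv_equiv track=rewrite | github.com/KirilStrezikozin/BakeMaster-Blender-Addon | utils.py | BM_Table_of_Objects_NameMatching_CombineGroups
-- ===== SOURCE A (Python) =====
-- def BM_Table_of_Objects_NameMatching_CombineGroups(groups: list):
--     sorted_groups = []
--     groups_lens = []
--     combined = []
--     # sorting each groups' shell and all shells by their len
--     for group in groups:
--         sorted_groups.append(sorted(group))
--         groups_lens.append(len(group))
--     sorted_groups = [g for _, g in sorted(
--         zip(groups_lens, sorted_groups), reverse=False)]
--     combined = [list(g) for g in sorted_groups]
--
--     # remove repetitive indexes
--     deleted = []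
--     for index, group in enumerate(sorted_groups):
--         deleted.append([])
--         for n_index, number in enumerate(group):
--             for index_1, group_1 in enumerate(sorted_groups):
--                 if number in group_1 and index_1 != index:
--                     try:
--                         # if index was already deleted
--                         deleted[index].index(number)
--                     except (IndexError, ValueError):
--                         try:
--                             # if found was already deleted
--                             deleted[index_1].index(number)
--                         except (IndexError, ValueError):
--                             # delete the index
--                             deleted[index].append(number)
--                             del combined[index][combined[index].index(number)]
--                             break
--                         else:
--                             pass
--                     else:
--                         continue
--     # return non-empty groups
--     return [group for group in combined if len(group)]
-- ===== SOURCE B (Python) =====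
-- def BM_Table_of_Objects_NameMatching_CombineGroups(groups: list):
--     # sort each group, then order groups by (length, contents); map every number to
--     # the last group (in that order) containing it; keep it only there.
--     sg = sorted((sorted(g) for g in groups), key=lambda g: (len(g), g))
--     owner = {}
--     for i, g in enumerate(sg):
--         for x in g:
--             owner[x] = i
--     result = []
--     for i, g in enumerate(sg):
--         kept = []
--         removed = set()
--         for x in g:
--             if owner[x] > i and x not in removed:
--                 removed.add(x)
--             else:
--                 kept.append(x)
--         if kept:
--             result.append(kept)
--     return result
-- ===== Notes on version B (the rewrite author's own statement) =====
-- stated objective: faster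
-- what changed: Replaces the triple nested scan with its try/except bookkeeping by one pass that maps each number to the last group (in the sorted order) containing it, then a single filtering pass per group keeping a number only in its owner group (dropping one occurrence elsewhere).
import Mathlib
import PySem

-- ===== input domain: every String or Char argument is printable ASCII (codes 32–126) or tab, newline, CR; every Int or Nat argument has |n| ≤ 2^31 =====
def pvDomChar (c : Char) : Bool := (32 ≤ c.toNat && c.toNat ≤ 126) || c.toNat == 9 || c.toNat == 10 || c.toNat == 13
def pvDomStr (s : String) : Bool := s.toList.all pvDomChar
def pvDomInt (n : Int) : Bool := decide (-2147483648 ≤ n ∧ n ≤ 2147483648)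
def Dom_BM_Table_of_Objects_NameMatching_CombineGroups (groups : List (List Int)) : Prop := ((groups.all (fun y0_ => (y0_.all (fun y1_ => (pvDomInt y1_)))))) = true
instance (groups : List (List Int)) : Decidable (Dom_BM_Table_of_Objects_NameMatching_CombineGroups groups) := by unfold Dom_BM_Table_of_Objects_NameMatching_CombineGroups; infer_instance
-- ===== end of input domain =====

-- B replaces A's cubic cross-group scanning by an owner map (last sorted-group containing each
-- number) plus one filtering pass per group; objective: faster (asymptotic).


-- ===== PORT A =====

-- `del combined[index][combined[index].index(number)]` (the element is always present there)
def pvEraseFirst (l : List Int) (x : Int) : List Int := (PySem.List.remove? l x).getD l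

-- inner `for index_1, group_1 in enumerate(sorted_groups)` loop of A, st = (combined, deleted);
-- the always-in-range `deleted[index]` / `combined[index]` accesses are total via getD,
-- `deleted[index_1]` keeps its possible IndexError (pyGet? = none), which A catches and deletes on
def pvInnerA (idx : Int) (x : Int) (st : List (List Int) × List (List Int)) :
    List (Int × List Int) → List (List Int) × List (List Int)
  | [] => st
  | (i1, g1) :: rs =>
    if x ∈ g1 ∧ i1 ≠ idx then
      if x ∈ (PySem.List.pyGet? st.2 idx).getD [] then pvInnerA idx x st rs
      else
        match PySem.List.pyGet? st.2 i1 with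
        | some d1 =>
          if x ∈ d1 then pvInnerA idx x st rs
          else
            (PySem.List.pySetD st.1 idx (pvEraseFirst ((PySem.List.pyGet? st.1 idx).getD []) x),
             PySem.List.pySetD st.2 idx (((PySem.List.pyGet? st.2 idx).getD []) ++ [x]))
        | none =>
            (PySem.List.pySetD st.1 idx (pvEraseFirst ((PySem.List.pyGet? st.1 idx).getD []) x),
             PySem.List.pySetD st.2 idx (((PySem.List.pyGet? st.2 idx).getD []) ++ [x]))
    else pvInnerA idx x st rs

def BM_Table_of_Objects_NameMatching_CombineGroups (groups : List (List Int)) : List (List Int) :=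
  let sortedGroups0 := groups.map (fun g => PySem.List.sorted g (fun v => v) false)
  let groupsLens := groups.map (fun g => (g.length : Int))
  let sortedGroups :=
    (PySem.List.sorted2 (groupsLens.zip sortedGroups0) (fun p => p.1) (fun p => p.2) false).map
      (fun p => p.2)
  let combined := sortedGroups.map (fun g => g)
  let st := (PySem.List.enumerate sortedGroups 0).foldl
    (fun st p =>
      let st1 := (st.1, st.2 ++ [([] : List Int)])
      p.2.foldl (fun st x => pvInnerA p.1 x st (PySem.List.enumerate sortedGroups 0)) st1)
    (combined, [])
  st.1.filter (fun g => g.length != 0)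

-- ===== PORT B =====
def BM_Table_of_Objects_NameMatching_CombineGroups_alt (groups : List (List Int)) : List (List Int) :=
  let sg := PySem.List.sorted2 (groups.map (fun g => PySem.List.sorted g (fun v => v) false))
    (fun g => (g.length : Int)) (fun g => g) false
  let owner : PySem.Dict Int Int := (PySem.List.enumerate sg 0).foldl
    (fun d p => p.2.foldl (fun d x => d.insert x p.1) d) PySem.Dict.empty
  (PySem.List.enumerate sg 0).foldl
    (fun (res : List (List Int)) p =>
      let kr := p.2.foldl
        (fun (kr : List Int × PySem.Set Int) x =>
          if owner.getD x 0 > p.1 ∧ kr.2.contains x = false then (kr.1, kr.2.add x)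
          else (kr.1 ++ [x], kr.2))
        (([] : List Int), (PySem.Set.empty : PySem.Set Int))
      if kr.1.isEmpty then res else res ++ [kr.1])
    []

-- ===== PRECONDITION & SPEC =====
def Spec_BM_Table_of_Objects_NameMatching_CombineGroups (groups : List (List Int)) (out : List (List Int)) : Prop := out = BM_Table_of_Objects_NameMatching_CombineGroups_alt groups
instance (groups : List (List Int)) (out : List (List Int)) : Decidable (Spec_BM_Table_of_Objects_NameMatching_CombineGroups groups out) := by unfold Spec_BM_Table_of_Objects_NameMatching_CombineGroups; infer_instance

-- ===== CLAIM (what is proved, stated in full; the proofs are below) =====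
def Claim_equal_BM_Table_of_Objects_NameMatching_CombineGroups : Prop := ∀ (groups : List (List Int)), Dom_BM_Table_of_Objects_NameMatching_CombineGroups groups → Spec_BM_Table_of_Objects_NameMatching_CombineGroups groups (BM_Table_of_Objects_NameMatching_CombineGroups groups)

-- ===== LEMMAS AND PROOFS =====

-- x is also in a group strictly after position i
def pvSharedB (sg : List (List Int)) (i : Nat) (x : Int) : Bool :=
  (List.drop (i+1) sg).any (fun g => decide (x ∈ g))

-- the values A's middle loop appends to deleted[i] (seen = deleted[i] so far)
def pvDel (P : Int → Bool) (seen : List Int) : List Int → List Int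
  | [] => []
  | x :: xs => if P x = true ∧ x ∉ seen then x :: pvDel P (seen ++ [x]) xs else pvDel P seen xs

-- the values both versions keep in group i
def pvKeep (P : Int → Bool) (seen : List Int) : List Int → List Int
  | [] => []
  | x :: xs => if P x = true ∧ x ∉ seen then pvKeep P (seen ++ [x]) xs else x :: pvKeep P seen xs

-- g after erasing the first occurrence of each member of seen
def pvErase (seen : List Int) (g : List Int) : List Int := seen.foldl (fun l y => l.erase y) g

-- index of the last group containing x
def pvLast (x : Int) : List (List Int) → Option Nat
  | [] => none
  | g :: t =>
    match pvLast x t with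
    | some k => some (k + 1)
    | none => if x ∈ g then some 0 else none

theorem mem_pvDel {P : Int → Bool} : ∀ {g seen x}, x ∈ pvDel P seen g ↔ x ∈ g ∧ P x = true ∧ x ∉ seen := by
  intro g
  induction g with
  | nil => intro seen x; simp [pvDel]
  | cons y ys ih =>
    intro seen x
    by_cases hc : P y = true ∧ y ∉ seen
    · simp only [pvDel, if_pos hc, List.mem_cons, ih, List.mem_append]
      constructor
      · rintro (rfl | ⟨hx, hP, hns⟩)
        · exact ⟨Or.inl rfl, hc.1, hc.2⟩
        · exact ⟨Or.inr hx, hP, fun h => hns (Or.inl h)⟩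
      · rintro ⟨(rfl | hx), hP, hns⟩
        · exact Or.inl rfl
        · by_cases hxy : x = y
          · exact Or.inl hxy
          · exact Or.inr ⟨hx, hP, by simp [hns, hxy]⟩
    · simp only [pvDel, if_neg hc, ih, List.mem_cons]
      constructor
      · rintro ⟨hx, hP, hns⟩; exact ⟨Or.inr hx, hP, hns⟩
      · rintro ⟨(rfl | hx), hP, hns⟩
        · exact absurd ⟨hP, hns⟩ hc
        · exact ⟨hx, hP, hns⟩

theorem pvErase_cons_of_ne : ∀ {d : List Int} {x : Int}, (∀ y ∈ d, y ≠ x) → ∀ (l : List Int),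
    pvErase d (x :: l) = x :: pvErase d l := by
  intro d
  induction d with
  | nil => intro x h l; rfl
  | cons a d ih =>
    intro x h l
    have hax : a ≠ x := h a (List.mem_cons_self ..)
    simp only [pvErase, List.foldl_cons]
    rw [List.erase_cons_tail (by simp [Ne.symm hax])]
    exact ih (fun y hy => h y (List.mem_cons_of_mem _ hy)) _

theorem mem_pvErase {x : Int} : ∀ {d g : List Int}, x ∈ g → x ∉ d → x ∈ pvErase d g := by
  intro d
  induction d with
  | nil => intro g hg _; exact hg
  | cons a d ih =>
    intro g hg hnd
    have hxa : x ≠ a := fun h => hnd (h ▸ List.mem_cons_self ..)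
    simp only [pvErase, List.foldl_cons]
    exact ih ((List.mem_erase_of_ne hxa).2 hg) (fun h => hnd (List.mem_cons_of_mem _ h))

theorem pvErase_append (d : List Int) (x : Int) (g : List Int) :
    pvErase (d ++ [x]) g = (pvErase d g).erase x := by
  simp [pvErase, List.foldl_append]

theorem pvErase_del_eq_keep {P : Int → Bool} : ∀ (g seen : List Int),
    pvErase (pvDel P seen g) g = pvKeep P seen g := by
  intro g
  induction g with
  | nil => intro seen; rfl
  | cons x xs ih =>
    intro seen
    by_cases hc : P x = true ∧ x ∉ seen
    · simp only [pvDel, pvKeep, if_pos hc]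
      simp only [pvErase, List.foldl_cons, List.erase_cons_head]
      exact ih (seen ++ [x])
    · simp only [pvDel, pvKeep, if_neg hc]
      rw [pvErase_cons_of_ne ?h xs, ih seen]
      case h =>
        intro y hy heq
        rcases mem_pvDel.1 hy with ⟨-, hP, hns⟩
        exact hc ⟨heq ▸ hP, heq ▸ hns⟩

theorem pvLast_none_iff {x : Int} : ∀ {l : List (List Int)}, pvLast x l = none ↔ ∀ g ∈ l, x ∉ g := by
  intro l
  induction l with
  | nil => simp [pvLast]
  | cons g t ih =>
    cases h : pvLast x t with
    | some k =>
      simp only [pvLast, h]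
      constructor
      · intro hh; cases hh
      · intro hall
        have h2 : ∀ g ∈ t, x ∉ g := fun g hg => hall g (List.mem_cons_of_mem _ hg)
        rw [← ih] at h2; rw [h2] at h; cases h
    | none =>
      simp only [pvLast, h]
      by_cases hx : x ∈ g
      · rw [if_pos hx]
        constructor
        · intro hh; exact absurd hh (by simp)
        · intro hall; exact absurd hx (hall g (List.mem_cons_self ..))
      · rw [if_neg hx]
        constructor
        · intro _ g' hg'
          rcases List.mem_cons.1 hg' with rfl | hg2
          · exact hx
          · exact (ih.1 h) g' hg2
        · intro _; rfl

theorem pvLast_gt_iff {x : Int} : ∀ {l : List (List Int)} {i : Nat} (hi : i < l.length), x ∈ l[i] →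
    ∃ k, pvLast x l = some k ∧ (i < k ↔ pvSharedB l i x = true) := by
  intro l
  induction l with
  | nil => intro i hi; simp at hi
  | cons g t ih =>
    intro i hi hx
    cases i with
    | zero =>
      cases h : pvLast x t with
      | some k =>
        refine ⟨k + 1, by simp [pvLast, h], ?_⟩
        constructor
        · intro _
          have h2 : ¬ ∀ g' ∈ t, x ∉ g' := fun hall => by
            rw [pvLast_none_iff.2 hall] at h; cases h
          push_neg at h2
          rcases h2 with ⟨g', hg', hxg'⟩
          simp only [pvSharedB, List.drop_succ_cons, List.drop_zero, List.any_eq_true]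
          exact ⟨g', hg', by simpa using hxg'⟩
        · intro _; omega
      | none =>
        have hxg : x ∈ g := by simpa using hx
        refine ⟨0, by simp [pvLast, h, hxg], ?_⟩
        simp only [Nat.lt_irrefl, false_iff]
        intro hsh
        simp only [pvSharedB, List.drop_succ_cons, List.drop_zero, List.any_eq_true] at hsh
        rcases hsh with ⟨g', hg', hxg'⟩
        exact (pvLast_none_iff.1 h) g' hg' (by simpa using hxg')
    | succ j =>
      have hj : j < t.length := by simpa using hi
      have hxj : x ∈ t[j] := by simpa using hx
      rcases ih hj hxj with ⟨k, hk, hiff⟩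
      refine ⟨k + 1, by simp [pvLast, hk], ?_⟩
      have hss : pvSharedB (g :: t) (j + 1) x = pvSharedB t j x := by
        simp [pvSharedB]
      rw [hss]
      constructor
      · intro hlt; exact hiff.1 (by omega)
      · intro hsh; have := hiff.2 hsh; omega

theorem getD_foldl_insert_const (g : List Int) (v : Int) :
    ∀ (d : PySem.Dict Int Int) (x : Int),
      ((g.foldl (fun d y => d.insert y v) d).getD x 0) = if x ∈ g then v else d.getD x 0 := by
  induction g with
  | nil => intro d x; simp
  | cons a g ih =>
    intro d x
    simp only [List.foldl_cons, ih, List.mem_cons]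
    by_cases hxa : x = a
    · subst hxa
      by_cases hxg : x ∈ g <;> simp [hxg, pysem]
    · by_cases hxg : x ∈ g <;> simp [hxg, hxa, pysem, PySem.Dict.getD]

theorem owner_getD : ∀ (l : List (List Int)) (s : Int) (d : PySem.Dict Int Int) (x : Int),
    (((PySem.List.enumerate l s).foldl (fun d p => p.2.foldl (fun d x => d.insert x p.1) d) d).getD x 0)
      = match pvLast x l with
        | some k => s + k
        | none => d.getD x 0 := by
  intro l
  induction l with
  | nil => intro s d x; simp [PySem.List.enumerate, pvLast]
  | cons g t ih =>
    intro s d x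
    rw [PySem.List.enumerate_cons]
    simp only [List.foldl_cons]
    rw [ih]
    simp only [pvLast]
    cases h : pvLast x t with
    | some k =>
      push_cast; ring
    | none =>
      rw [getD_foldl_insert_const]
      by_cases hx : x ∈ g <;> simp [hx]


theorem pvGet_mid : ∀ (A : List (List Int)) (b : List Int) (C : List (List Int)),
    (A ++ b :: C)[A.length]? = some b := by
  intro A
  induction A with
  | nil => intro b C; rfl
  | cons a A ih => intro b C; simpa using ih b C

theorem pvSet_mid : ∀ (A : List (List Int)) (b v : List Int) (C : List (List Int)),
    (A ++ b :: C).set A.length v = A ++ v :: C := by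
  intro A
  induction A with
  | nil => intro b v C; rfl
  | cons a A ih => intro b v C; simp [ih b v C]

theorem pvSharedB_iff {sg : List (List Int)} {i : Nat} {x : Int} :
    pvSharedB sg i x = true ↔ ∃ j, i < j ∧ j < sg.length ∧ x ∈ sg.getD j [] := by
  simp only [pvSharedB, List.any_eq_true, decide_eq_true_eq]
  constructor
  · rintro ⟨g, hg, hxg⟩
    rcases List.mem_iff_getElem.1 hg with ⟨k, hk, rfl⟩
    have hk' : i + 1 + k < sg.length := by
      have := List.length_drop (l := sg) (i := i + 1); omega
    refine ⟨i + 1 + k, by omega, hk', ?_⟩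
    rw [List.getD_eq_getElem _ _ hk']
    rw [List.getElem_drop] at hxg
    exact hxg
  · rintro ⟨j, hij, hj, hx⟩
    rw [List.getD_eq_getElem _ _ hj] at hx
    refine ⟨sg[j], ?_, hx⟩
    refine List.mem_iff_getElem.2 ⟨j - (i + 1), by have := List.length_drop (l := sg) (i := i + 1); omega, ?_⟩
    rw [List.getElem_drop]
    simp only [show i + 1 + (j - (i + 1)) = j from by omega]

theorem pvInner_spec (sg : List (List Int)) (i : Nat) (x : Int) (seen : List Int)
    (C : List (List Int)) (D : List (List Int)) (hD : D.length = i)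
    (hpass : ∀ j, j < i → x ∈ sg.getD j [] → x ∈ D.getD j []) :
    ∀ (n m : Nat), m + n = sg.length →
    pvInnerA (i : Int) x (C, D ++ [seen]) (PySem.List.enumerate (sg.drop m) (m : Int)) =
      if x ∉ seen ∧ ∃ j < sg.length, m ≤ j ∧ i < j ∧ x ∈ sg.getD j [] then
        (PySem.List.pySetD C (i : Int) (pvEraseFirst ((PySem.List.pyGet? C (i : Int)).getD []) x),
         PySem.List.pySetD (D ++ [seen]) (i : Int) (seen ++ [x]))
      else (C, D ++ [seen]) := by
  intro n
  induction n with
  | zero =>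
    intro m hm
    have hmlen : m = sg.length := by omega
    have hnone : ¬ (x ∉ seen ∧ ∃ j < sg.length, m ≤ j ∧ i < j ∧ x ∈ sg.getD j []) := by
      rintro ⟨-, j, hj3, hj1, -⟩; omega
    rw [if_neg hnone, hmlen, List.drop_length, PySem.List.enumerate_nil]
    rfl
  | succ n ih =>
    intro m hm
    have hlt : m < sg.length := by omega
    rw [List.drop_eq_getElem_cons hlt, PySem.List.enumerate_cons]
    have hcast : ((m : Int) + 1) = ((m + 1 : Nat) : Int) := by push_cast; ring
    -- the seen entry of deleted
    have hseen : (PySem.List.pyGet? (D ++ [seen]) (i : Int)).getD [] = seen := by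
      rw [PySem.List.pyGet?_natCast]
      rw [← hD, List.getElem?_concat_length]
      rfl
    by_cases hmi : m = i
    · -- index_1 = index: skipped
      have hcond : ¬ (x ∈ sg[m] ∧ ((m : Int) ≠ (i : Int))) := by
        rintro ⟨-, hne⟩; exact hne (by rw [hmi])
      simp only [pvInnerA, if_neg hcond]
      rw [hcast, ih (m + 1) (by omega)]
      have hiff : (x ∉ seen ∧ ∃ j < sg.length, m + 1 ≤ j ∧ i < j ∧ x ∈ sg.getD j [])
          ↔ (x ∉ seen ∧ ∃ j < sg.length, m ≤ j ∧ i < j ∧ x ∈ sg.getD j []) := by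
        constructor
        · rintro ⟨h1, j, hl, hj1, hj2, hj4⟩; exact ⟨h1, j, hl, by omega, hj2, hj4⟩
        · rintro ⟨h1, j, hl, hj1, hj2, hj4⟩; exact ⟨h1, j, hl, by omega, hj2, hj4⟩
      rw [if_congr hiff rfl rfl]
    · by_cases hxm : x ∈ sg[m]
      · have hcond : x ∈ sg[m] ∧ ((m : Int) ≠ (i : Int)) :=
          ⟨hxm, by exact_mod_cast hmi⟩
        simp only [pvInnerA, if_pos hcond, hseen]
        by_cases hxseen : x ∈ seen
        · rw [if_pos hxseen, hcast, ih (m + 1) (by omega)]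
          have hneg1 : ¬ (x ∉ seen ∧ ∃ j < sg.length, m + 1 ≤ j ∧ i < j ∧ x ∈ sg.getD j []) := by
            rintro ⟨h1, -⟩; exact h1 hxseen
          have hneg2 : ¬ (x ∉ seen ∧ ∃ j < sg.length, m ≤ j ∧ i < j ∧ x ∈ sg.getD j []) := by
            rintro ⟨h1, -⟩; exact h1 hxseen
          rw [if_neg hneg1, if_neg hneg2]
        · rw [if_neg hxseen]
          by_cases hmi2 : m < i
          · -- earlier group: x is in its deleted list, pass
            have hget : PySem.List.pyGet? (D ++ [seen]) ((m : Nat) : Int) = some (D.getD m []) := by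
              rw [PySem.List.pyGet?_natCast]
              rw [List.getElem?_append_left (by omega), List.getElem?_eq_getElem (by omega)]
              rw [List.getD_eq_getElem _ _ (by omega)]
            rw [hget]
            have hxd : x ∈ D.getD m [] := by
              apply hpass m hmi2
              rw [List.getD_eq_getElem _ _ hlt]; exact hxm
            simp only [if_pos hxd]
            rw [hcast, ih (m + 1) (by omega)]
            have hiff : (x ∉ seen ∧ ∃ j < sg.length, m + 1 ≤ j ∧ i < j ∧ x ∈ sg.getD j [])
                ↔ (x ∉ seen ∧ ∃ j < sg.length, m ≤ j ∧ i < j ∧ x ∈ sg.getD j []) := by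
              constructor
              · rintro ⟨h1, j, hl, hj1, hj2, hj4⟩; exact ⟨h1, j, hl, by omega, hj2, hj4⟩
              · rintro ⟨h1, j, hl, hj1, hj2, hj4⟩; exact ⟨h1, j, hl, by omega, hj2, hj4⟩
            rw [if_congr hiff rfl rfl]
          · -- later group: deleted[index_1] raises IndexError, A deletes here
            have hgt : i < m := by omega
            have hget : PySem.List.pyGet? (D ++ [seen]) ((m : Nat) : Int) = none := by
              rw [PySem.List.pyGet?_natCast, List.getElem?_eq_none]
              simp [hD]; omega
            rw [hget]
            have hpos : x ∉ seen ∧ ∃ j < sg.length, m ≤ j ∧ i < j ∧ x ∈ sg.getD j [] := by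
              refine ⟨hxseen, m, hlt, le_refl m, hgt, ?_⟩
              rw [List.getD_eq_getElem _ _ hlt]; exact hxm
            rw [if_pos hpos]
      · have hcond : ¬ (x ∈ sg[m] ∧ ((m : Int) ≠ (i : Int))) := by
          rintro ⟨h1, -⟩; exact hxm h1
        simp only [pvInnerA, if_neg hcond]
        rw [hcast, ih (m + 1) (by omega)]
        have hiff : (x ∉ seen ∧ ∃ j < sg.length, m + 1 ≤ j ∧ i < j ∧ x ∈ sg.getD j [])
            ↔ (x ∉ seen ∧ ∃ j < sg.length, m ≤ j ∧ i < j ∧ x ∈ sg.getD j []) := by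
          constructor
          · rintro ⟨h1, j, hl, hj1, hj2, hj4⟩; exact ⟨h1, j, hl, by omega, hj2, hj4⟩
          · rintro ⟨h1, j, hj3, hj1, hj2, hj4⟩
            have hjm : m + 1 ≤ j := by
              by_cases hjeq : j = m
              · exfalso; apply hxm; subst hjeq; rw [List.getD_eq_getElem _ _ hlt] at hj4; exact hj4
              · omega
            exact ⟨h1, j, hj3, hjm, hj2, hj4⟩
        rw [if_congr hiff rfl rfl]

theorem pvEraseFirst_eq (l : List Int) (x : Int) (h : x ∈ l) : pvEraseFirst l x = l.erase x := by
  rw [pvEraseFirst, PySem.List.remove?_eq_some_erase l x h]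
  rfl

theorem pvMid_spec (sg : List (List Int)) (i : Nat) (hi : i < sg.length)
    (Apre Bsuf : List (List Int)) (hA : Apre.length = i)
    (D : List (List Int)) (hD : D.length = i)
    (hpass : ∀ j, j < i → ∀ y, y ∈ sg.getD j [] → y ∈ sg[i] → y ∈ D.getD j []) :
    ∀ (gs : List Int), (∀ y ∈ gs, y ∈ sg[i]) → ∀ (seen : List Int),
    gs.foldl (fun st x => pvInnerA (i : Int) x st (PySem.List.enumerate sg 0))
        (Apre ++ pvErase seen sg[i] :: Bsuf, D ++ [seen]) =
      (Apre ++ pvErase (seen ++ pvDel (pvSharedB sg i) seen gs) sg[i] :: Bsuf,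
       D ++ [seen ++ pvDel (pvSharedB sg i) seen gs]) := by
  intro gs
  induction gs with
  | nil => intro _ seen; simp [pvDel]
  | cons x xs ih =>
    intro hgs seen
    have hx : x ∈ sg[i] := hgs x (List.mem_cons_self ..)
    have hstep := pvInner_spec sg i x seen (Apre ++ pvErase seen sg[i] :: Bsuf) D hD
      (fun j hj hmem => hpass j hj x hmem hx) sg.length 0 (by omega)
    rw [show ((0 : Nat) : Int) = (0 : Int) from rfl, List.drop_zero] at hstep
    simp only [List.foldl_cons]
    rw [hstep]
    have hshared : (∃ j < sg.length, 0 ≤ j ∧ i < j ∧ x ∈ sg.getD j [])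
        ↔ pvSharedB sg i x = true := by
      rw [pvSharedB_iff]
      constructor
      · rintro ⟨j, hl, -, h1, h2⟩; exact ⟨j, h1, hl, h2⟩
      · rintro ⟨j, h1, hl, h2⟩; exact ⟨j, hl, by omega, h1, h2⟩
    by_cases hc : pvSharedB sg i x = true ∧ x ∉ seen
    · have hcc : x ∉ seen ∧ ∃ j < sg.length, 0 ≤ j ∧ i < j ∧ x ∈ sg.getD j [] :=
        ⟨hc.2, hshared.2 hc.1⟩
      rw [if_pos hcc]
      have hgetC : ∀ (e : List Int), (PySem.List.pyGet? (Apre ++ e :: Bsuf) (i : Int)).getD [] = e := by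
        intro e
        rw [PySem.List.pyGet?_natCast, ← hA, pvGet_mid]
        rfl
      have hxe : x ∈ pvErase seen sg[i] := mem_pvErase hx hc.2
      have hef : pvEraseFirst (pvErase seen sg[i]) x = pvErase (seen ++ [x]) sg[i] := by
        rw [pvEraseFirst_eq _ _ hxe, ← pvErase_append]
      rw [hgetC, hef]
      have hsetC : ∀ (e v : List Int), PySem.List.pySetD (Apre ++ e :: Bsuf) (i : Int) v
          = Apre ++ v :: Bsuf := by
        intro e v
        rw [PySem.List.pySetD_natCast, ← hA, pvSet_mid]
      have hsetD : PySem.List.pySetD (D ++ [seen]) (i : Int) (seen ++ [x])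
          = D ++ [seen ++ [x]] := by
        rw [PySem.List.pySetD_natCast, ← hD]
        exact pvSet_mid D seen (seen ++ [x]) []
      rw [hsetC, hsetD]
      rw [ih (fun y hy => hgs y (List.mem_cons_of_mem _ hy)) (seen ++ [x])]
      have hstep2 : pvDel (pvSharedB sg i) seen (x :: xs)
          = x :: pvDel (pvSharedB sg i) (seen ++ [x]) xs := by
        rw [pvDel, if_pos hc]
      rw [hstep2]
      simp only [List.append_assoc, List.cons_append, List.nil_append]
    · have hneg : ¬ (x ∉ seen ∧ ∃ j < sg.length, 0 ≤ j ∧ i < j ∧ x ∈ sg.getD j []) := by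
        rintro ⟨h1, h2⟩; exact hc ⟨hshared.1 h2, h1⟩
      rw [if_neg hneg]
      rw [ih (fun y hy => hgs y (List.mem_cons_of_mem _ hy)) seen]
      simp only [pvDel, if_neg hc]

def pvPk (sg : List (List Int)) (j : Nat) : List Int := pvKeep (pvSharedB sg j) [] (sg.getD j [])
def pvPd (sg : List (List Int)) (j : Nat) : List Int := pvDel (pvSharedB sg j) [] (sg.getD j [])

theorem pvOuter_spec (sg : List (List Int)) : ∀ (n m : Nat), m + n = sg.length →
    (PySem.List.enumerate (sg.drop m) (m : Int)).foldl
      (fun st p =>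
        let st1 := (st.1, st.2 ++ [([] : List Int)])
        p.2.foldl (fun st x => pvInnerA p.1 x st (PySem.List.enumerate sg 0)) st1)
      ((List.range m).map (pvPk sg) ++ sg.drop m, (List.range m).map (pvPd sg)) =
    ((List.range sg.length).map (pvPk sg), (List.range sg.length).map (pvPd sg)) := by
  intro n
  induction n with
  | zero =>
    intro m hm
    have hmlen : m = sg.length := by omega
    subst hmlen
    rw [List.drop_length, PySem.List.enumerate_nil]
    simp
  | succ n ih =>
    intro m hm
    have hlt : m < sg.length := by omega
    have hpass : ∀ j, j < m → ∀ y, y ∈ sg.getD j [] → y ∈ sg[m] →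
        y ∈ ((List.range m).map (pvPd sg)).getD j [] := by
      intro j hj y hyj hym
      have hDgetD : ((List.range m).map (pvPd sg)).getD j [] = pvPd sg j := by
        rw [List.getD_eq_getElem _ _ (by simp [hj])]
        simp
      rw [hDgetD]
      unfold pvPd
      rw [mem_pvDel]
      refine ⟨hyj, ?_, by simp⟩
      rw [pvSharedB_iff]
      exact ⟨m, by omega, hlt, by rw [List.getD_eq_getElem _ _ hlt]; exact hym⟩
    have hmid := pvMid_spec sg m hlt ((List.range m).map (pvPk sg)) (sg.drop (m + 1))
      (by simp) ((List.range m).map (pvPd sg)) (by simp) hpass sg[m] (fun y hy => hy) []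
    rw [show pvErase ([] : List Int) sg[m] = sg[m] from rfl] at hmid
    rw [List.drop_eq_getElem_cons hlt, PySem.List.enumerate_cons]
    simp only [List.foldl_cons]
    rw [hmid]
    have hkeep : pvErase ([] ++ pvDel (pvSharedB sg m) [] sg[m]) sg[m] = pvPk sg m := by
      rw [List.nil_append, pvErase_del_eq_keep]
      unfold pvPk
      rw [List.getD_eq_getElem _ _ hlt]
    have hdel : ([] ++ pvDel (pvSharedB sg m) [] sg[m]) = pvPd sg m := by
      rw [List.nil_append]
      unfold pvPd
      rw [List.getD_eq_getElem _ _ hlt]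
    rw [hkeep, hdel]
    have e1 : (List.range m).map (pvPk sg) ++ pvPk sg m :: sg.drop (m + 1)
        = (List.range (m + 1)).map (pvPk sg) ++ sg.drop (m + 1) := by
      rw [List.range_succ, List.map_append, List.append_cons]
      rfl
    have e2 : (List.range m).map (pvPd sg) ++ [pvPd sg m] = (List.range (m + 1)).map (pvPd sg) := by
      rw [List.range_succ, List.map_append]
      rfl
    have hcast : ((m : Int) + 1) = ((m + 1 : Nat) : Int) := by push_cast; ring
    rw [e1, e2, hcast]
    exact ih (m + 1) (by omega)

theorem pvBMid_spec (sg : List (List Int)) (i : Nat) (hi : i < sg.length)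
    (owner : PySem.Dict Int Int)
    (hcond : ∀ x ∈ sg[i], (owner.getD x 0 > (i : Int)) ↔ pvSharedB sg i x = true) :
    ∀ (gs : List Int), (∀ y ∈ gs, y ∈ sg[i]) → ∀ (acc seen : List Int),
    gs.foldl (fun (kr : List Int × PySem.Set Int) x =>
        if owner.getD x 0 > (i : Int) ∧ kr.2.contains x = false then (kr.1, kr.2.add x)
        else (kr.1 ++ [x], kr.2)) (acc, seen)
      = (acc ++ pvKeep (pvSharedB sg i) seen gs, seen ++ pvDel (pvSharedB sg i) seen gs) := by
  intro gs
  induction gs with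
  | nil => intro _ acc seen; simp [pvKeep, pvDel]
  | cons x xs ih =>
    intro hgs acc seen
    have hx : x ∈ sg[i] := hgs x (List.mem_cons_self ..)
    have hcontains : (PySem.Set.contains seen x = false) ↔ x ∉ seen := by
      simp [PySem.Set.contains]
    simp only [List.foldl_cons]
    by_cases hc : pvSharedB sg i x = true ∧ x ∉ seen
    · have hcnd : owner.getD x 0 > (i : Int) ∧ PySem.Set.contains seen x = false :=
        ⟨(hcond x hx).2 hc.1, hcontains.2 hc.2⟩
      rw [if_pos hcnd]
      have hadd : PySem.Set.add seen x = seen ++ [x] := by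
        simp [PySem.Set.add, hc.2]
      rw [hadd, ih (fun y hy => hgs y (List.mem_cons_of_mem _ hy)) acc (seen ++ [x])]
      have hk : pvKeep (pvSharedB sg i) seen (x :: xs)
          = pvKeep (pvSharedB sg i) (seen ++ [x]) xs := by
        rw [pvKeep, if_pos hc]
      have hd : pvDel (pvSharedB sg i) seen (x :: xs)
          = x :: pvDel (pvSharedB sg i) (seen ++ [x]) xs := by
        rw [pvDel, if_pos hc]
      rw [hk, hd]
      simp only [List.append_assoc, List.cons_append, List.nil_append]
    · have hcnd : ¬ (owner.getD x 0 > (i : Int) ∧ PySem.Set.contains seen x = false) := by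
        rintro ⟨h1, h2⟩
        exact hc ⟨(hcond x hx).1 h1, hcontains.1 h2⟩
      rw [if_neg hcnd]
      rw [ih (fun y hy => hgs y (List.mem_cons_of_mem _ hy)) (acc ++ [x]) seen]
      have hk : pvKeep (pvSharedB sg i) seen (x :: xs)
          = x :: pvKeep (pvSharedB sg i) seen xs := by
        rw [pvKeep, if_neg hc]
      have hd : pvDel (pvSharedB sg i) seen (x :: xs)
          = pvDel (pvSharedB sg i) seen xs := by
        rw [pvDel, if_neg hc]
      rw [hk, hd]
      simp only [List.append_assoc, List.cons_append, List.nil_append]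

theorem pvBOut_spec (sg : List (List Int)) (owner : PySem.Dict Int Int)
    (hcond : ∀ (i : Nat) (hi : i < sg.length), ∀ x ∈ sg[i],
      (owner.getD x 0 > (i : Int)) ↔ pvSharedB sg i x = true) :
    ∀ (n m : Nat), m + n = sg.length → ∀ (res : List (List Int)),
    (PySem.List.enumerate (sg.drop m) (m : Int)).foldl
      (fun (res : List (List Int)) p =>
        if (p.2.foldl (fun (kr : List Int × PySem.Set Int) x =>
            if owner.getD x 0 > p.1 ∧ kr.2.contains x = false then (kr.1, kr.2.add x)
            else (kr.1 ++ [x], kr.2)) (([] : List Int), ([] : PySem.Set Int))).1.isEmpty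
        then res
        else res ++ [(p.2.foldl (fun (kr : List Int × PySem.Set Int) x =>
            if owner.getD x 0 > p.1 ∧ kr.2.contains x = false then (kr.1, kr.2.add x)
            else (kr.1 ++ [x], kr.2)) (([] : List Int), ([] : PySem.Set Int))).1]) res
    = res ++ ((List.range' m n).map (pvPk sg)).filter (fun g => !g.isEmpty) := by
  intro n
  induction n with
  | zero =>
    intro m hm res
    have hmlen : m = sg.length := by omega
    subst hmlen
    rw [List.drop_length, PySem.List.enumerate_nil]
    simp [List.range']
  | succ n ih =>
    intro m hm res
    have hlt : m < sg.length := by omega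
    rw [List.drop_eq_getElem_cons hlt, PySem.List.enumerate_cons]
    simp only [List.foldl_cons]
    have hmid := pvBMid_spec sg m hlt owner (fun x hx => hcond m hlt x hx) sg[m]
      (fun y hy => hy) [] []
    rw [hmid]
    have hpk : ([] : List Int) ++ pvKeep (pvSharedB sg m) [] sg[m] = pvPk sg m := by
      rw [List.nil_append]
      unfold pvPk
      rw [List.getD_eq_getElem _ _ hlt]
    rw [hpk]
    have hcast : ((m : Int) + 1) = ((m + 1 : Nat) : Int) := by push_cast; ring
    rw [hcast]
    have hrange : List.range' m (n + 1) = m :: List.range' (m + 1) n := by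
      simp [List.range']
    rw [hrange, List.map_cons, List.filter_cons]
    by_cases he : (pvPk sg m).isEmpty
    · rw [if_pos he, ih (m + 1) (by omega) res]
      have : (!(pvPk sg m).isEmpty) = false := by rw [he]; rfl
      rw [this]
      rfl
    · rw [if_neg he, ih (m + 1) (by omega) (res ++ [pvPk sg m])]
      have : (!(pvPk sg m).isEmpty) = true := by
        cases hval : (pvPk sg m).isEmpty with
        | true => exact absurd hval he
        | false => rfl
      rw [this]
      simp [List.append_assoc]

theorem pvInsert_snd (bfP : (Int × List Int) → (Int × List Int) → Bool)
    (bf : List Int → List Int → Bool)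
    (hbf : ∀ p q : Int × List Int, p.1 = (p.2.length : Int) → q.1 = (q.2.length : Int) →
      bfP p q = bf p.2 q.2) :
    ∀ (acc : List (Int × List Int)) (p : Int × List Int), p.1 = (p.2.length : Int) →
      (∀ q ∈ acc, q.1 = (q.2.length : Int)) →
      (PySem.List.insertBy bfP p acc).map (fun q => q.2)
        = PySem.List.insertBy bf p.2 (acc.map (fun q => q.2)) := by
  intro acc
  induction acc with
  | nil => intro p _ _; rfl
  | cons q acc ih =>
    intro p hp hacc
    have hq : q.1 = (q.2.length : Int) := hacc q (List.mem_cons_self ..)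
    simp only [PySem.List.insertBy, List.map_cons]
    rw [hbf p q hp hq]
    cases hb : bf p.2 q.2 with
    | true => rfl
    | false =>
      simp only [Bool.false_eq_true, if_false, List.map_cons]
      rw [ih p hp (fun r hr => hacc r (List.mem_cons_of_mem _ hr))]

theorem pvFold_snd (bfP : (Int × List Int) → (Int × List Int) → Bool)
    (bf : List Int → List Int → Bool)
    (hbf : ∀ p q : Int × List Int, p.1 = (p.2.length : Int) → q.1 = (q.2.length : Int) →
      bfP p q = bf p.2 q.2) :
    ∀ (pl acc : List (Int × List Int)), (∀ p ∈ pl, p.1 = (p.2.length : Int)) →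
      (∀ q ∈ acc, q.1 = (q.2.length : Int)) →
      (pl.foldl (fun a x => PySem.List.insertBy bfP x a) acc).map (fun q => q.2)
        = (pl.map (fun q => q.2)).foldl (fun a x => PySem.List.insertBy bf x a)
            (acc.map (fun q => q.2)) := by
  intro pl
  induction pl with
  | nil => intro acc _ _; rfl
  | cons p pl ih =>
    intro acc hpl hacc
    have hp : p.1 = (p.2.length : Int) := hpl p (List.mem_cons_self ..)
    simp only [List.foldl_cons, List.map_cons]
    rw [← pvInsert_snd bfP bf hbf acc p hp hacc]
    exact ih _ (fun r hr => hpl r (List.mem_cons_of_mem _ hr))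
      (fun r hr => by
        rcases (PySem.List.mem_insertBy ..).1 hr with rfl | hr2
        · exact hp
        · exact hacc r hr2)

theorem pvSort_eq (groups : List (List Int)) :
    ((PySem.List.sorted2 ((groups.map (fun g => (g.length : Int))).zip
        (groups.map (fun g => PySem.List.sorted g (fun v => v) false)))
      (fun p => p.1) (fun p => p.2) false).map (fun p => p.2))
    = PySem.List.sorted2 (groups.map (fun g => PySem.List.sorted g (fun v => v) false))
        (fun g => (g.length : Int)) (fun g => g) false := by
  rw [List.zip_map']
  simp only [PySem.List.sorted2, Bool.false_eq_true, if_false]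
  have hfold := pvFold_snd
    (fun (a b : Int × List Int) =>
      decide (a.1 < b.1) || (!decide (b.1 < a.1) && decide (a.2 < b.2)))
    (fun (a b : List Int) =>
      decide ((a.length : Int) < (b.length : Int)) ||
        (!decide ((b.length : Int) < (a.length : Int)) && decide (a < b)))
    (by
      intro p q hp hq
      dsimp only
      rw [hp, hq])
    (groups.map (fun g => ((g.length : Int), PySem.List.sorted g (fun v => v) false))) []
    (by
      intro p hp
      rcases List.mem_map.1 hp with ⟨g, hg, rfl⟩
      simp [PySem.List.length_sorted])
    (by simp)
  simp only [List.map_map] at hfold ⊢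
  convert hfold using 2

-- ===== VERDICT (by name: the statement is the Claim_ definition above) =====
theorem BM_Table_of_Objects_NameMatching_CombineGroups_spec : Claim_equal_BM_Table_of_Objects_NameMatching_CombineGroups := by
  intro groups _hdom
  unfold Spec_BM_Table_of_Objects_NameMatching_CombineGroups
  simp only [BM_Table_of_Objects_NameMatching_CombineGroups,
    BM_Table_of_Objects_NameMatching_CombineGroups_alt]
  rw [pvSort_eq]
  rw [show (PySem.Set.empty : PySem.Set Int) = ([] : PySem.Set Int) from rfl]
  set sg := PySem.List.sorted2 (groups.map (fun g => PySem.List.sorted g (fun v => v) false))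
    (fun g => (g.length : Int)) (fun g => g) false with hsg
  have hmapid : sg.map (fun g => g) = sg := by simp
  rw [hmapid]
  have hA := pvOuter_spec sg sg.length 0 (by omega)
  simp only [List.range_zero, List.map_nil, List.nil_append, List.drop_zero, Nat.cast_zero] at hA
  rw [hA]
  have hcond : ∀ (i : Nat) (hi : i < sg.length), ∀ x ∈ sg[i],
      (((PySem.List.enumerate sg 0).foldl
          (fun d p => p.2.foldl (fun d x => d.insert x p.1) d) PySem.Dict.empty).getD x 0
        > (i : Int)) ↔ pvSharedB sg i x = true := by
    intro i hi x hx
    rcases pvLast_gt_iff hi hx with ⟨k, hk, hiff⟩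
    have h0 : ((PySem.List.enumerate sg 0).foldl
        (fun d p => p.2.foldl (fun d x => d.insert x p.1) d) PySem.Dict.empty).getD x 0
        = (k : Int) := by
      rw [owner_getD, hk]
      simp
    rw [h0]
    constructor
    · intro h; exact hiff.1 (by omega)
    · intro h; have := hiff.2 h; omega
  have hB := pvBOut_spec sg
    ((PySem.List.enumerate sg 0).foldl
      (fun d p => p.2.foldl (fun d x => d.insert x p.1) d) PySem.Dict.empty)
    hcond sg.length 0 (by omega) []
  simp only [List.drop_zero, Nat.cast_zero, List.nil_append] at hB
  rw [hB]
  rw [show List.range' 0 sg.length = List.range sg.length from List.range_eq_range'.symm]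
  exact List.filter_congr (fun g _ => by cases g <;> simp)
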